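-- pv_equiv track=rewrite | github.com/steveandroulakis/fpl-influencer-hivemind | youtube-transcript/utils.py | filter_transcript_by_keywords
-- ===== SOURCE A (Python) =====
-- def filter_transcript_by_keywords(
--     transcript_data: list[dict], keywords: list[str], case_sensitive: bool = False
-- ) -> list[dict]:
--     """
--     Filter transcript segments containing specific keywords.
--
--     Args:
--         transcript_data: List of transcript segments
--         keywords: List of keywords to search for
--         case_sensitive: Whether to perform case-sensitive search
--
--     Returns:
--         List[Dict]: Filtered transcript segments
--     """
--     if not keywords:
--         return transcript_data
--
--     filtered_segments = []
--
--     for segment in transcript_data: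
--         text = segment["text"]
--         if not case_sensitive:
--             text = text.lower()
--             search_keywords = [k.lower() for k in keywords]
--         else:
--             search_keywords = keywords
--
--         # Check if any keyword appears in this segment
--         if any(keyword in text for keyword in search_keywords):
--             filtered_segments.append(segment)
--
--     return filtered_segments
-- ===== SOURCE B (Python) =====
-- def filter_transcript_by_keywords(
--     transcript_data: list[dict], keywords: list[str], case_sensitive: bool = False
-- ) -> list[dict]:
--     if not keywords:
--         return transcript_data
--     if case_sensitive:
--         texts = [seg["text"] for seg in transcript_data]
--         needles = keywords
--     else:
--         texts = [seg["text"].lower() for seg in transcript_data]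
--         needles = [k.lower() for k in keywords]
--     # invert the loops: one pass over the segments PER NEEDLE, collecting
--     # the indices of matched segments in a set, then rebuild in order
--     matched = set()
--     for needle in needles:
--         for i, text in enumerate(texts):
--             if i not in matched and needle in text:
--                 matched.add(i)
--     return [seg for i, seg in enumerate(transcript_data) if i in matched]
-- ===== Notes on version B (the rewrite author's own statement) =====
-- stated objective: alternative
-- what changed: B inverts the loop nesting: it precomputes the (possibly lowercased) texts once, then scans the segments once per keyword collecting matched indices into a set (skipping already-matched segments), and finally rebuilds the filtered list from the index set in original order, instead of A's single pass that rebuilds the keyword list and runs an any() over all keywords for every segment.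
-- outside the precondition, e.g. on filter_transcript_by_keywords([{'start': '0'}], ['a'], False): A raises KeyError, B raises KeyError
import Mathlib
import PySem

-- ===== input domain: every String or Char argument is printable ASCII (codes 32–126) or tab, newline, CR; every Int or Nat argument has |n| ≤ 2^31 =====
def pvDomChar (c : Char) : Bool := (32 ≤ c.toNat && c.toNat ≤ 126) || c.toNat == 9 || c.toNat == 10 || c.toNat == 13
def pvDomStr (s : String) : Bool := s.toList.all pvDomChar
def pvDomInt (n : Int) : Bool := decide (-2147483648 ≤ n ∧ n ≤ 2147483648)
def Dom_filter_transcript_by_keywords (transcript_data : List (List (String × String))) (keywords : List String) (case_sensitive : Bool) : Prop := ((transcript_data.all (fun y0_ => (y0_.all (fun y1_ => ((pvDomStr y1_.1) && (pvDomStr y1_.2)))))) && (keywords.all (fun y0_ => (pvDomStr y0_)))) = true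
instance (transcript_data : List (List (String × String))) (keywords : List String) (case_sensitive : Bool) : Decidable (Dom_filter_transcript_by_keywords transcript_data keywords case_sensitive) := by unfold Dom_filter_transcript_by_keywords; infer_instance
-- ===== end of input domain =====

-- B inverts the loop nesting: texts are preprocessed once, then one scan of the segments per
-- keyword collects matched indices into a set, and the result is rebuilt from the index set
-- in original order (alternative decomposition; same results wherever A returns).


-- ===== PORT A =====
def filter_transcript_by_keywords (transcript_data : List (List (String × String))) (keywords : List String) (case_sensitive : Bool) : List (List (String × String)) :=
  if keywords = [] then transcript_data
  else
    transcript_data.foldl (fun filtered_segments segment =>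
      -- segment["text"]: KeyError (none) is excluded by Pre_; the default is never reached there
      let text := (PySem.Dict.get? (PySem.Dict.mk segment) "text").getD ""
      let text' := if case_sensitive then text else PySem.Str.lower text
      let search_keywords := if case_sensitive then keywords else keywords.map PySem.Str.lower
      if search_keywords.any (fun keyword => PySem.Str.isIn keyword text') then
        filtered_segments ++ [segment]
      else filtered_segments) []

-- ===== PORT B =====
-- segment["text"] of B, total under Pre_ exactly like A's
def pvSegText (seg : List (String × String)) : String :=
  (PySem.Dict.get? (PySem.Dict.mk seg) "text").getD ""

def filter_transcript_by_keywords_alt (transcript_data : List (List (String × String))) (keywords : List String) (case_sensitive : Bool) : List (List (String × String)) :=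
  if keywords = [] then transcript_data
  else
    let texts := if case_sensitive then transcript_data.map pvSegText
                 else transcript_data.map (fun seg => PySem.Str.lower (pvSegText seg))
    let needles := if case_sensitive then keywords else keywords.map PySem.Str.lower
    let matched : PySem.Set Int := needles.foldl (fun s needle =>
      (PySem.List.enumerate texts).foldl (fun s it =>
        if !PySem.Set.contains s it.1 && PySem.Str.isIn needle it.2 then
          PySem.Set.add s it.1
        else s) s) PySem.Set.empty
    ((PySem.List.enumerate transcript_data).filter
      (fun it => PySem.Set.contains matched it.1)).map (·.2)

-- ===== PRECONDITION & SPEC =====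
-- Pre_ excludes exactly the inputs where Python A raises KeyError: keywords nonempty and some
-- segment lacking a "text" key (B raises the same KeyError there).
def Pre_filter_transcript_by_keywords (transcript_data : List (List (String × String))) (keywords : List String) (case_sensitive : Bool) : Prop :=
  keywords = [] ∨ ∀ seg ∈ transcript_data, (PySem.Dict.mk seg).contains "text" = true
instance (transcript_data : List (List (String × String))) (keywords : List String) (case_sensitive : Bool) : Decidable (Pre_filter_transcript_by_keywords transcript_data keywords case_sensitive) := by unfold Pre_filter_transcript_by_keywords; infer_instance
def pvWitness_filter_transcript_by_keywords : (List (List (String × String))) × List String × Bool :=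
  ([[("text", "Hello World")], [("text", "bye")]], ["hello"], false)
def Spec_filter_transcript_by_keywords (transcript_data : List (List (String × String))) (keywords : List String) (case_sensitive : Bool) (out : List (List (String × String))) : Prop := out = filter_transcript_by_keywords_alt transcript_data keywords case_sensitive
instance (transcript_data : List (List (String × String))) (keywords : List String) (case_sensitive : Bool) (out : List (List (String × String))) : Decidable (Spec_filter_transcript_by_keywords transcript_data keywords case_sensitive out) := by unfold Spec_filter_transcript_by_keywords; infer_instance

-- ===== CLAIM (what is proved, stated in full; the proofs are below) =====
def Claim_equal_filter_transcript_by_keywords : Prop := ∀ (transcript_data : List (List (String × String))) (keywords : List String) (case_sensitive : Bool), Dom_filter_transcript_by_keywords transcript_data keywords case_sensitive → Pre_filter_transcript_by_keywords transcript_data keywords case_sensitive → Spec_filter_transcript_by_keywords transcript_data keywords case_sensitive (filter_transcript_by_keywords transcript_data keywords case_sensitive)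

-- ===== LEMMAS AND PROOFS =====

-- membership after B's inner loop (one needle over the enumerated texts)
theorem pv_inner_mem (needle : String) (texts : List String) :
    ∀ (start : Int) (s : PySem.Set Int) (j : Int),
      j ∈ (PySem.List.enumerate texts start).foldl (fun s it =>
            if !PySem.Set.contains s it.1 && PySem.Str.isIn needle it.2 then
              PySem.Set.add s it.1 else s) s
      ↔ j ∈ s ∨ ∃ (k : Nat) (h : k < texts.length),
            j = start + (k : Int) ∧ PySem.Str.isIn needle texts[k] = true := by
  induction texts with
  | nil => intro start s j; simp [PySem.List.enumerate_nil]
  | cons t ts ih =>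
    intro start s j
    rw [PySem.List.enumerate_cons, List.foldl_cons, ih (start + 1)]
    have hstep : (j ∈ (if !PySem.Set.contains s start && PySem.Str.isIn needle t then
          PySem.Set.add s start else s)) ↔
        j ∈ s ∨ (j = start ∧ PySem.Str.isIn needle t = true) := by
      by_cases hin : PySem.Str.isIn needle t = true
      · by_cases hc : PySem.Set.contains s start = true
        · have hs : start ∈ s := (PySem.Set.contains_iff _ _).1 hc
          have hcond : (!PySem.Set.contains s start && PySem.Str.isIn needle t) = false := by
            rw [hc]; simp
          rw [if_neg (by rw [hcond]; exact Bool.false_ne_true)]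
          constructor
          · exact Or.inl
          · rintro (hj | ⟨rfl, -⟩) <;> [exact hj; exact hs]
        · have hcond : (!PySem.Set.contains s start && PySem.Str.isIn needle t) = true := by
            rw [eq_false_of_ne_true hc, hin]; simp
          rw [if_pos hcond, PySem.Set.mem_add]
          constructor
          · rintro (hj | hj) <;> [exact Or.inl hj; exact Or.inr ⟨hj, hin⟩]
          · rintro (hj | ⟨rfl, -⟩) <;> [exact Or.inl hj; exact Or.inr rfl]
      · have hin' : PySem.Str.isIn needle t = false := eq_false_of_ne_true hin
        have hcond : (!PySem.Set.contains s start && PySem.Str.isIn needle t) = false := by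
          rw [hin']; simp
        rw [if_neg (by rw [hcond]; exact Bool.false_ne_true), hin']
        simp
    rw [hstep]
    constructor
    · rintro ((h | h) | ⟨k, hk, rfl, hm⟩)
      · exact Or.inl h
      · exact Or.inr ⟨0, by simp, by simpa using h.1, by simpa using h.2⟩
      · refine Or.inr ⟨k + 1, by simp only [List.length_cons]; omega, ?_, by simpa using hm⟩
        push_cast; ring
    · rintro (h | ⟨k, hk, rfl, hm⟩)
      · exact Or.inl (Or.inl h)
      · cases k with
        | zero => exact Or.inl (Or.inr ⟨by simp, by simpa using hm⟩)
        | succ k =>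
          refine Or.inr ⟨k, by simp only [List.length_cons] at hk; omega, ?_, by simpa using hm⟩
          push_cast; ring

-- membership in B's matched set (all needles)
theorem pv_matched_mem (needles : List String) (texts : List String) :
    ∀ (s : PySem.Set Int) (j : Int),
      j ∈ needles.foldl (fun s needle =>
            (PySem.List.enumerate texts).foldl (fun s it =>
              if !PySem.Set.contains s it.1 && PySem.Str.isIn needle it.2 then
                PySem.Set.add s it.1 else s) s) s
      ↔ j ∈ s ∨ ∃ (k : Nat) (h : k < texts.length),
            j = (k : Int) ∧ ∃ n ∈ needles, PySem.Str.isIn n texts[k] = true := by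
  induction needles with
  | nil => intro s j; simp
  | cons n ns ih =>
    intro s j
    rw [List.foldl_cons, ih, pv_inner_mem]
    constructor
    · rintro ((h | ⟨k, hk, rfl, hm⟩) | ⟨k, hk, rfl, n', hn', hm⟩)
      · exact Or.inl h
      · exact Or.inr ⟨k, hk, by simp, n, List.mem_cons_self, hm⟩
      · exact Or.inr ⟨k, hk, rfl, n', List.mem_cons_of_mem _ hn', hm⟩
    · rintro (h | ⟨k, hk, rfl, n', hn', hm⟩)
      · exact Or.inl (Or.inl h)
      · rcases List.mem_cons.1 hn' with rfl | hn'
        · exact Or.inl (Or.inr ⟨k, hk, by simp, hm⟩)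
        · exact Or.inr ⟨k, hk, rfl, n', hn', hm⟩

-- filtering an enumeration by an index predicate that agrees with an element predicate
theorem pv_filter_enumerate {α : Type} (p : α → Bool) :
    ∀ (xs : List α) (start : Int) (q : Int → Bool),
      (∀ (k : Nat) (h : k < xs.length), q (start + (k : Int)) = p xs[k]) →
      ((PySem.List.enumerate xs start).filter (fun it => q it.1)).map (·.2) = xs.filter p := by
  intro xs
  induction xs with
  | nil => intro start q _; simp [PySem.List.enumerate_nil]
  | cons x xs ih =>
    intro start q hq
    rw [PySem.List.enumerate_cons, List.filter_cons]
    have h0 : q start = p x := by simpa using hq 0 (by simp)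
    have hrest := ih (start + 1) q (fun k hk => by
      have := hq (k + 1) (by simpa using hk)
      simpa [add_assoc, add_comm, add_left_comm] using this)
    by_cases hp : p x = true
    · rw [if_pos (by rw [h0]; exact hp), List.map_cons, hrest,
        List.filter_cons_of_pos hp]
    · have hpf : p x = false := eq_false_of_ne_true hp
      rw [if_neg (by simp [h0, hpf]), hrest, List.filter_cons_of_neg (by simp [hpf])]

-- the common case: A's append-loop equals B's enumerate/index-set reconstruction, for a fixed
-- text extractor f and fixed needle list
theorem pv_main (td : List (List (String × String))) (needles : List String)
    (f : List (String × String) → String) :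
    td.foldl (fun acc seg =>
        if needles.any (fun kw => PySem.Str.isIn kw (f seg)) then acc ++ [seg] else acc) [] =
      ((PySem.List.enumerate td).filter (fun it =>
        PySem.Set.contains (needles.foldl (fun s needle =>
          (PySem.List.enumerate (td.map f)).foldl (fun s it =>
            if !PySem.Set.contains s it.1 && PySem.Str.isIn needle it.2 then
              PySem.Set.add s it.1 else s) s) PySem.Set.empty) it.1)).map (·.2) := by
  rw [PySem.List.foldl_append_if_eq_filter, List.nil_append]
  refine (pv_filter_enumerate _ td 0 _ ?_).symm
  intro k hk
  apply Bool.eq_iff_iff.mpr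
  rw [PySem.Set.contains_eq_listContains, List.contains_iff_mem, zero_add,
    pv_matched_mem needles (td.map f) PySem.Set.empty (k : Int)]
  simp only [PySem.Set.empty, List.not_mem_nil, false_or]
  constructor
  · rintro ⟨k', hk', hkk, n', hn', hm⟩
    have hke : k' = k := by exact_mod_cast hkk.symm
    subst hke
    simp only [List.getElem_map] at hm
    exact List.any_eq_true.mpr ⟨n', hn', hm⟩
  · intro hp
    obtain ⟨kw, hkw, hm⟩ := List.any_eq_true.mp hp
    exact ⟨k, by simpa using hk, rfl, kw, hkw, by simpa using hm⟩

-- ===== VERDICT (by name: the statement is the Claim_ definition above) =====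
theorem filter_transcript_by_keywords_spec : Claim_equal_filter_transcript_by_keywords := by
  intro td kws cs _ _
  unfold Spec_filter_transcript_by_keywords filter_transcript_by_keywords filter_transcript_by_keywords_alt
  by_cases h : kws = []
  · simp [h]
  · cases cs <;> simp only [h, if_false, if_true, Bool.false_eq_true, pvSegText] <;>
      [exact pv_main td (kws.map PySem.Str.lower)
        (fun seg => PySem.Str.lower ((PySem.Dict.get? (PySem.Dict.mk seg) "text").getD ""));
       exact pv_main td kws
        (fun seg => (PySem.Dict.get? (PySem.Dict.mk seg) "text").getD "")]
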